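-- pv_equiv track=rewrite | github.com/4LAR/Stone-Chat | server.py | namew
-- ===== SOURCE A (Python) =====
-- def namew(msg):
-- 	name = ""
-- 	s1 = False; s2 = False
-- 	for i in msg:
-- 		if i == "]":
-- 			s2 = True
-- 		if s1 and not s2:
-- 			name += i
-- 		if i == "[":
-- 		 	s1 = True
-- 	return name
-- ===== SOURCE B (Python) =====
-- def namew(msg):
--     i1 = msg.find('[')
--     if i1 == -1:
--         return ''
--     i2 = msg.find(']')
--     if i2 == -1:
--         return msg[i1 + 1:]
--     if i2 < i1:
--         return ''
--     return msg[i1 + 1:i2]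
-- ===== Notes on version B (the rewrite author's own statement) =====
-- stated objective: simpler
-- what changed: Replaces the character-by-character state-machine loop (two boolean flags, char accumulation) with two find() index lookups and one slice.
import Mathlib
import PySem

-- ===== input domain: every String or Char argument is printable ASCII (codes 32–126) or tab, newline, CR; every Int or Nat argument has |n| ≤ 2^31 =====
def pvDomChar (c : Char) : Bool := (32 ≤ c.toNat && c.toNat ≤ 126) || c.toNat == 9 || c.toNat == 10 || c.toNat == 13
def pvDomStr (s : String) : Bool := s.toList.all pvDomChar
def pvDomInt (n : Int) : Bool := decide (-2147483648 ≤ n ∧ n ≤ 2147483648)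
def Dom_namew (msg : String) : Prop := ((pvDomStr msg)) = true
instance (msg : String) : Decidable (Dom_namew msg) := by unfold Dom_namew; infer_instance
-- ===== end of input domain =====

-- B replaces A's flag-driven character loop by two find() index lookups and one slice (objective: simpler).

-- ===== PORT A =====
-- A's loop body: set s2 at ']', append when s1 ∧ ¬s2, set s1 at '[' (in that order).
def namewStep (st : List Char × Bool × Bool) (i : Char) : List Char × Bool × Bool :=
  let name := st.1
  let s1 := st.2.1
  let s2 := st.2.2
  let s2 := if i = ']' then true else s2
  let name := if s1 && !s2 then name ++ [i] else name
  let s1 := if i = '[' then true else s1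
  (name, s1, s2)

def namew (msg : String) : String :=
  String.ofList (msg.toList.foldl namewStep ([], false, false)).1

-- ===== PORT B =====
def namew_alt (msg : String) : String :=
  let i1 := PySem.Str.find msg "["
  if i1 = -1 then ""
  else
    let i2 := PySem.Str.find msg "]"
    if i2 = -1 then PySem.Str.slice msg (some (i1 + 1)) none
    else if i2 < i1 then ""
    else PySem.Str.slice msg (some (i1 + 1)) (some i2)

-- ===== PRECONDITION & SPEC =====
def Spec_namew (msg : String) (out : String) : Prop := out = namew_alt msg
instance (msg : String) (out : String) : Decidable (Spec_namew msg out) := by unfold Spec_namew; infer_instance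

-- ===== CLAIM (what is proved, stated in full; the proofs are below) =====
def Claim_equal_namew : Prop := ∀ (msg : String), Dom_namew msg → Spec_namew msg (namew msg)

-- ===== LEMMAS AND PROOFS =====

-- the value A's loop accumulates, characterized structurally
def pvF : List Char → List Char
  | [] => []
  | c :: r => if c = ']' then [] else if c = '[' then r.takeWhile (fun x => x != ']') else pvF r

-- B's result, stated over lists with findIdx?
def pvG (cs : List Char) : List Char :=
  match cs.findIdx? (fun x => x == '[') with
  | none => []
  | some i1 =>
    match cs.findIdx? (fun x => x == ']') with
    | none => cs.drop (i1 + 1)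
    | some i2 => if i2 < i1 then [] else (cs.drop (i1 + 1)).take (i2 - (i1 + 1))

lemma foldA_s2 (cs : List Char) : ∀ (acc : List Char) (s1 : Bool),
    (cs.foldl namewStep (acc, s1, true)).1 = acc := by
  induction cs with
  | nil => intro acc s1; rfl
  | cons c r ih =>
    intro acc s1
    rw [List.foldl_cons]
    have hstep : namewStep (acc, s1, true) c = (acc, (if c = '[' then true else s1), true) := by
      simp [namewStep]
    rw [hstep]; exact ih acc _

lemma foldA_s1 (cs : List Char) : ∀ (acc : List Char),
    (cs.foldl namewStep (acc, true, false)).1 = acc ++ cs.takeWhile (fun x => x != ']') := by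
  induction cs with
  | nil => intro acc; simp
  | cons c r ih =>
    intro acc
    rw [List.foldl_cons]
    by_cases hc : c = ']'
    · subst hc
      have hstep : namewStep (acc, true, false) ']' = (acc, true, true) := by
        simp [namewStep]
      rw [hstep, foldA_s2]
      simp
    · have hstep : namewStep (acc, true, false) c = (acc ++ [c], true, false) := by
        simp [namewStep, hc]
      rw [hstep, ih]
      simp [hc, bne]

lemma foldA_main (cs : List Char) : ∀ (acc : List Char),
    (cs.foldl namewStep (acc, false, false)).1 = acc ++ pvF cs := by
  induction cs with
  | nil => intro acc; simp [pvF]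
  | cons c r ih =>
    intro acc
    rw [List.foldl_cons]
    by_cases hc : c = ']'
    · subst hc
      have hstep : namewStep (acc, false, false) ']' = (acc, false, true) := by
        simp [namewStep]
      rw [hstep, foldA_s2]; simp [pvF]
    · by_cases hb : c = '['
      · subst hb
        have hstep : namewStep (acc, false, false) '[' = (acc, true, false) := by
          simp [namewStep]
        rw [hstep, foldA_s1]; simp [pvF]
      · have hstep : namewStep (acc, false, false) c = (acc, false, false) := by
          simp [namewStep, hc, hb]
        rw [hstep, ih]; simp [pvF, hc, hb]

lemma namew_eq (msg : String) : namew msg = String.ofList (pvF msg.toList) := by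
  simp [namew, foldA_main]

lemma singleton_prefix_iff (d : Char) (t : List Char) : [d] <+: t ↔ t.head? = some d := by
  cases t with
  | nil => simp
  | cons a r => simp [List.cons_prefix_cons, eq_comm]

lemma drop_get_prefix (s : List Char) (k : Nat) (d : Char) :
    ([d] <+: s.drop k) ↔ s[k]? = some d := by
  rw [singleton_prefix_iff, List.head?_drop]

lemma pvFindSingle (s : List Char) (d : Char) :
    PySem.Chars.find s [d] =
      (match s.findIdx? (fun x => x == d) with | some i => (i : Int) | none => -1) := by
  cases h : s.findIdx? (fun x => x == d) with
  | none =>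
    have hmem := List.findIdx?_eq_none_iff.mp h
    have hnin : d ∉ s := fun hd => by simpa using hmem d hd
    have hni : ¬ ([d] <:+: s) := fun hin => hnin (List.Sublist.mem (by simp) hin.sublist)
    exact (PySem.Chars.find_eq_neg_one_iff s [d]).mpr hni
  | some i =>
    obtain ⟨hi, hpi, hmin⟩ := List.findIdx?_eq_some_iff_getElem.mp h
    have hgi : s[i]? = some d := by
      rw [List.getElem?_eq_getElem hi]; simpa using hpi
    have hinf : [d] <:+: s := by
      have h1 : [d] <+: s.drop i := (drop_get_prefix s i d).mpr hgi
      exact h1.isInfix.trans (List.drop_suffix i s).isInfix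
    have hnn : 0 ≤ PySem.Chars.find s [d] := (PySem.Chars.find_nonneg_iff s [d]).mpr hinf
    obtain ⟨hpre, hminf⟩ := PySem.Chars.find_spec hnn
    have hgn : s[(PySem.Chars.find s [d]).toNat]? = some d :=
      (drop_get_prefix s (PySem.Chars.find s [d]).toNat d).mp hpre
    have hin : i = (PySem.Chars.find s [d]).toNat := by
      rcases lt_trichotomy i (PySem.Chars.find s [d]).toNat with hlt | he | hgt
      · exact absurd ((drop_get_prefix s i d).mpr hgi) (hminf i hlt)
      · exact he
      · obtain ⟨hnlen, hval⟩ := List.getElem?_eq_some_iff.mp hgn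
        exact absurd (by simp [hval]) (hmin _ hgt)
    have := Int.toNat_of_nonneg hnn
    simp only [hin, this]

lemma alt_eq (msg : String) : namew_alt msg = String.ofList (pvG msg.toList) := by
  rw [← String.toList_inj]
  unfold namew_alt pvG
  simp only [PySem.Str.find_eq]
  rw [show ("[" : String).toList = ['['] from rfl, show ("]" : String).toList = [']'] from rfl]
  rw [pvFindSingle, pvFindSingle]
  cases h1 : msg.toList.findIdx? (fun x => x == '[') with
  | none => simp
  | some i1 =>
    have hne1 : ¬((i1 : Int) = -1) := by omega
    cases h2 : msg.toList.findIdx? (fun x => x == ']') with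
    | none =>
      have hc : ((i1 : Int) + 1) = ((i1 + 1 : Nat) : Int) := by push_cast; ring
      rw [if_neg hne1, if_pos (rfl : (-1 : Int) = -1), PySem.Str.toList_slice,
        PySem.Chars.slice_eq_listSlice, hc, PySem.List.slice_from_natCast,
        String.toList_ofList]
    | some i2 =>
      have hne2 : ¬((i2 : Int) = -1) := by omega
      by_cases hlt : i2 < i1
      · have hlt' : ((i2 : Int) < (i1 : Int)) := by omega
        simp [hne1, hne2, hlt', hlt]
      · have hlt' : ¬((i2 : Int) < (i1 : Int)) := by omega
        have hc : ((i1 : Int) + 1) = ((i1 + 1 : Nat) : Int) := by push_cast; ring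
        rw [if_neg hne1, if_neg hne2, if_neg hlt', PySem.Str.toList_slice,
          PySem.Chars.slice_eq_listSlice, hc, PySem.List.slice_natCast,
          String.toList_ofList]
        simp [hlt]

lemma tw_none : ∀ (r : List Char), r.findIdx? (fun x => x == ']') = none →
    r.takeWhile (fun x => x != ']') = r := by
  intro r
  induction r with
  | nil => intro _; rfl
  | cons a t ih =>
    intro h
    rw [List.findIdx?_cons] at h
    by_cases pa : (a == ']') = true
    · rw [if_pos pa] at h; exact absurd h (by simp)
    · have pa' : (a == ']') = false := by simpa using pa
      rw [if_neg (by simp [pa'])] at h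
      have ht : t.findIdx? (fun x => x == ']') = none := by
        cases hgt : t.findIdx? (fun x => x == ']') <;> simp [hgt] at h ⊢
      have hbt : (a != ']') = true := by simp [bne, pa']
      rw [List.takeWhile_cons, if_pos hbt, ih ht]

lemma tw_some : ∀ (r : List Char) (j : Nat), r.findIdx? (fun x => x == ']') = some j →
    r.takeWhile (fun x => x != ']') = r.take j := by
  intro r
  induction r with
  | nil => intro j h; simp at h
  | cons a t ih =>
    intro j h
    rw [List.findIdx?_cons] at h
    by_cases pa : (a == ']') = true
    · rw [if_pos pa] at h
      have hj : j = 0 := by simpa using h.symm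
      subst hj
      have hbf : ¬((a != ']') = true) := by simp [bne, pa]
      rw [List.takeWhile_cons, if_neg hbf]
      rfl
    · have pa' : (a == ']') = false := by simpa using pa
      rw [if_neg (by simp [pa'])] at h
      cases hgt : t.findIdx? (fun x => x == ']') with
      | none => rw [hgt] at h; simp at h
      | some j' =>
        rw [hgt] at h
        have hj : j = j' + 1 := by simpa using h.symm
        subst hj
        have hbt : (a != ']') = true := by simp [bne, pa']
        rw [List.takeWhile_cons, if_pos hbt, ih j' hgt, List.take_succ_cons]

lemma pvF_eq_pvG (cs : List Char) : pvF cs = pvG cs := by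
  induction cs with
  | nil => rfl
  | cons c r ih =>
    unfold pvG
    rw [List.findIdx?_cons, List.findIdx?_cons]
    by_cases h1 : c = ']'
    · subst h1
      simp only [beq_self_eq_true, if_true,
        show ((']' : Char) == '[') = false from by decide]
      cases hf : r.findIdx? (fun x => x == '[') <;> simp [pvF]
    · by_cases h2 : c = '['
      · subst h2
        simp only [beq_self_eq_true, if_true,
          show (('[' : Char) == ']') = false from by decide]
        cases hf : r.findIdx? (fun x => x == ']') with
        | none => simp [pvF, tw_none r hf]
        | some j => simp [pvF, tw_some r j hf]
      · simp only [show ((c == ']') = false) from by simpa using h1,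
          show ((c == '[') = false) from by simpa using h2]
        rw [show pvF (c :: r) = pvF r from by simp [pvF, h1, h2], ih]
        unfold pvG
        cases hf1 : r.findIdx? (fun x => x == '[') with
        | none => simp
        | some i1 =>
          cases hf2 : r.findIdx? (fun x => x == ']') with
          | none => simp
          | some j =>
            by_cases hlt : j < i1
            · simp [hlt, show j + 1 < i1 + 1 from by omega]
            · simp [hlt, show ¬ (j + 1 < i1 + 1) from by omega,
                show (j + 1) - (i1 + 1 + 1) = j - (i1 + 1) from by omega]

-- ===== VERDICT (by name: the statement is the Claim_ definition above) =====
theorem namew_spec : Claim_equal_namew := by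
  intro msg _
  unfold Spec_namew
  rw [namew_eq, alt_eq, pvF_eq_pvG]
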